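-- pv_equiv track=rewrite | github.com/thealper2/codewars-solutions | 7-kyu/lonely_numbers.py | numbers_need_friends_too
-- ===== SOURCE A (Python) =====
-- def numbers_need_friends_too(n):
--     s = str(n)
--     result = []
--     i = 0
--     while i < len(s):
--         j = i
--         while j < len(s) and s[j] == s[i]:
--             j += 1
--
--         group = s[i:j]
--         if len(group) == 1:
--             result.append(group * 3)
--         else:
--             result.append(group)
--
--         i = j
--
--     return int(''.join(result))
-- ===== SOURCE B (Python) =====
-- def numbers_need_friends_too(n):
--     s = str(n)
--     out = []
--     for i, c in enumerate(s):
--         lone = (i == 0 or s[i - 1] != c) and (i == len(s) - 1 or s[i + 1] != c)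
--         out.append(c * 3 if lone else c)
--     return int(''.join(out))
-- ===== Notes on version B (the rewrite author's own statement) =====
-- stated objective: simpler
-- what changed: Replaces A's two nested while-loops that extract each maximal run as a slice with a single pass that classifies every character by its immediate neighbors (isolated iff it differs from both) and emits it once or three times.
-- outside the precondition, e.g. on numbers_need_friends_too(-5): A raises ValueError, B raises ValueError
import Mathlib
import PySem

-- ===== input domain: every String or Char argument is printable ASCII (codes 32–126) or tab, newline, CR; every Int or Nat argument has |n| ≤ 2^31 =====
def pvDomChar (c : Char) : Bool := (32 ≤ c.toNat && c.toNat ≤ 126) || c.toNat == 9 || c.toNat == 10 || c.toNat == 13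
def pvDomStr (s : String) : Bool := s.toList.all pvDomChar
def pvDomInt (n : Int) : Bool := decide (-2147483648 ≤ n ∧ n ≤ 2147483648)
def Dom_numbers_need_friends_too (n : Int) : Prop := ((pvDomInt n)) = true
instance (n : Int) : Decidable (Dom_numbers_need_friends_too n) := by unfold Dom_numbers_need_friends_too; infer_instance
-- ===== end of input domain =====

-- B replaces A's nested while-loops over maximal runs by a single neighbor-classifying
-- pass (objective: simpler). Equivalence is about the return value on n ≥ 0 (Pre_);
-- on n < 0 the Python A raises ValueError (int('---…')).

-- ===== PORT A =====
-- A's outer while extracts the maximal run group = s[i:j] (inner while = takeWhile),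
-- emits it tripled iff it has length 1, and continues at i = j (dropWhile).
def pvRunsA : List Char → List Char
  | [] => []
  | c :: rest =>
    let grp := c :: rest.takeWhile (fun x => x == c)
    let rest' := rest.dropWhile (fun x => x == c)
    (if grp.length == 1 then grp ++ grp ++ grp else grp) ++ pvRunsA rest'
termination_by l => l.length
decreasing_by
  simpa using Nat.lt_succ_of_le (List.length_dropWhile_le _ _)

-- int(''.join(result)); ofChars? is none exactly where Python's int() raises (n < 0, excluded by Pre_)
def numbers_need_friends_too (n : Int) : Int :=
  (PySem.Int.ofChars? (pvRunsA (PySem.Int.toChars n))).getD 0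

-- ===== PORT B =====
-- B walks the string once, carrying the previous char (s[i-1]) and peeking at the next
-- (s[i+1] = rest.head?); a char differing from both neighbors is emitted three times.
def pvLoneGo (prev : Option Char) : List Char → List Char
  | [] => []
  | c :: rest =>
    (if prev ≠ some c ∧ rest.head? ≠ some c then [c, c, c] else [c]) ++ pvLoneGo (some c) rest

def numbers_need_friends_too_alt (n : Int) : Int :=
  (PySem.Int.ofChars? (pvLoneGo none (PySem.Int.toChars n))).getD 0

-- ===== PRECONDITION & SPEC =====
-- Pre_ excludes n < 0, where Python A (and B) raise ValueError: str(n) starts with '-',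
-- a singleton run, so int() is applied to a string starting with '---'.
def Pre_numbers_need_friends_too (n : Int) : Prop := 0 ≤ n
instance (n : Int) : Decidable (Pre_numbers_need_friends_too n) := by
  unfold Pre_numbers_need_friends_too; infer_instance

def pvWitness_numbers_need_friends_too : Int := 11123355

def Spec_numbers_need_friends_too (n : Int) (out : Int) : Prop := out = numbers_need_friends_too_alt n
instance (n : Int) (out : Int) : Decidable (Spec_numbers_need_friends_too n out) := by
  unfold Spec_numbers_need_friends_too; infer_instance

-- ===== CLAIM (what is proved, stated in full; the proofs are below) =====
def Claim_equal_numbers_need_friends_too : Prop := ∀ (n : Int), Dom_numbers_need_friends_too n → Pre_numbers_need_friends_too n → Spec_numbers_need_friends_too n (numbers_need_friends_too n)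

-- ===== LEMMAS AND PROOFS =====

-- inside a run every char equals its predecessor, so B emits it exactly once
lemma pvLone_run (c : Char) : ∀ (t u : List Char), (∀ x ∈ t, x = c) →
    pvLoneGo (some c) (t ++ u) = t ++ pvLoneGo (some c) u := by
  intro t
  induction t with
  | nil => intro u _; simp
  | cons x t' ih =>
    intro u h
    have hx : x = c := h x (by simp)
    subst hx
    simp only [List.cons_append, pvLoneGo]
    rw [ih u (fun y hy => h y (by simp [hy]))]
    simp

-- the first char after the dropped run fails the predicate
lemma pvHead_dropWhile_false (p : Char → Bool) (l : List Char) (d : Char)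
    (h : (l.dropWhile p).head? = some d) : p d = false := by
  induction l with
  | nil => simp at h
  | cons a l ih =>
    rw [List.dropWhile_cons] at h
    split at h
    · exact ih h
    · simp_all

lemma pvRuns_eq_lone_aux : ∀ (N : Nat) (l : List Char), l.length ≤ N → ∀ (p : Option Char),
    (∀ c, l.head? = some c → p ≠ some c) → pvRunsA l = pvLoneGo p l := by
  intro N
  induction N with
  | zero =>
    intro l hl p _
    have : l = [] := List.eq_nil_of_length_eq_zero (Nat.le_zero.mp hl)
    subst this; rw [pvRunsA]; rfl
  | succ N ih =>
    intro l hl p hp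
    cases l with
    | nil => rw [pvRunsA]; rfl
    | cons c rest =>
      have hp' : p ≠ some c := hp c rfl
      have hu : ∀ d, (rest.dropWhile (fun x => x == c)).head? = some d → d ≠ c := by
        intro d hd hdc
        have := pvHead_dropWhile_false _ _ _ hd
        simp [hdc] at this
      have hlen : (rest.dropWhile (fun x => x == c)).length ≤ N :=
        le_trans (List.length_dropWhile_le _ _) (Nat.le_of_succ_le_succ hl)
      have hIH : pvRunsA (rest.dropWhile (fun x => x == c)) =
          pvLoneGo (some c) (rest.dropWhile (fun x => x == c)) :=
        ih _ hlen (some c) (fun d hd he => hu d hd (by injection he.symm))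
      rw [pvRunsA]
      cases ht : rest.takeWhile (fun x => x == c) with
      | nil =>
        have hrest : rest.dropWhile (fun x => x == c) = rest := by
          conv_rhs => rw [← List.takeWhile_append_dropWhile (p := fun x => x == c) (l := rest)]
          rw [ht]; rfl
        have hhead : rest.head? ≠ some c := by
          intro hh
          rw [← hrest] at hh
          exact hu c hh rfl
        rw [hrest] at hIH
        simp only [hrest]
        rw [hIH, pvLoneGo]
        simp [hp', hhead]
      | cons x t' =>
        have hmem : ∀ y ∈ x :: t', y = c := by
          intro y hy
          have := List.mem_takeWhile_imp (ht ▸ hy)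
          simpa using this
        have htu : (x :: t') ++ rest.dropWhile (fun x => x == c) = rest := by
          conv_rhs => rw [← List.takeWhile_append_dropWhile (p := fun x => x == c) (l := rest)]
          rw [ht]
        have hx : x = c := hmem x (by simp)
        have hhead : rest.head? = some c := by
          rw [← htu]; simp [hx]
        rw [if_neg (by simp), hIH, pvLoneGo, if_neg (by simp [hhead])]
        conv_rhs => rw [← htu]
        rw [pvLone_run c (x :: t') _ hmem]
        simp [hx]

lemma pvRuns_eq_lone (l : List Char) (p : Option Char)
    (h : ∀ c, l.head? = some c → p ≠ some c) : pvRunsA l = pvLoneGo p l :=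
  pvRuns_eq_lone_aux l.length l le_rfl p h

-- ===== VERDICT (by name: the statement is the Claim_ definition above) =====
theorem numbers_need_friends_too_spec : Claim_equal_numbers_need_friends_too := by
  intro n _ _
  unfold Spec_numbers_need_friends_too numbers_need_friends_too numbers_need_friends_too_alt
  rw [pvRuns_eq_lone _ none (by intro c _ h; cases h)]
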